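-- pv_equiv track=rewrite | github.com/XMOS-JoeG/sw_dev_proj | mash/python/mash.py | MASH_1_1_1
-- ===== SOURCE A (Python) =====
-- ACCUM_WIDTH = 20
--
-- def accum_carry(a, b, m):
--     # Mask off any input data above m bits
--     mask = ((1 << m) - 1) # Mask is all 1s, m bits wide.
--     a = a & mask # Just keep bottom m bits.
--     b = b & mask # Just keep bottom m bits.
--     sum = a + b
--     carry = (sum & (1 << m)) >> m # Pull out the carry bit at bit position (m + 1)
--     sum = sum & mask # Mask off carry bit, just keep bottom m bits.
--     return sum, carry
--
-- def MASH_1_1_1(data_in):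
--   "This outputs an 8-level (-3 to +4 inclusive) 1-1-1 MASH modulated data set from an input data set of floating point samples"
--   data_out = []
--   # reset/initial values of flops
--   q0 = 1 # Set this to a small odd number. If we set 0 and then only provide a fixed input we are likely to get repeating patterns. Not terribly important, we can always seed random values in here by setting the modulator input to a random number for a while and then setting the value we want.
--   q1 = 0
--   q2 = 0
--   c1_d = 0
--   c2_d = 0
--   c2_d_d = 0
--   for i in range(len(data_in)):
--     d0, c0 = accum_carry(q0, data_in[i], ACCUM_WIDTH)
--     d1, c1 = accum_carry(q1, d0        , ACCUM_WIDTH)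
--     d2, c2 = accum_carry(q2, d1        , ACCUM_WIDTH)
--     # build output
--     first  = c0
--     second = first + (c1 - c1_d)
--     third  =  second + c2 - (c2_d << 1) + c2_d_d
--     data_out.append(third)
--     # Time has ticked so update all our variables
--     # Latches
--     q0 = d0
--     q1 = d1
--     q2 = d2
--     # Delayed Carry flip flops
--     c2_d_d = c2_d
--     c2_d = c2
--     c1_d = c1
--   return data_out
-- ===== SOURCE B (Python) =====
-- ACCUM_WIDTH = 20
--
-- _M = 1 << ACCUM_WIDTH
--
-- def _stage(seed, xs):
--     "Cumulative-sum stage: running total T (seeded), emits T mod 2^20 and the step increment of T >> 20 (the carry)."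
--     T = seed
--     ds = []
--     cs = []
--     for x in xs:
--         Tn = T + x
--         ds.append(Tn & (_M - 1))
--         cs.append((Tn >> ACCUM_WIDTH) - (T >> ACCUM_WIDTH))
--         T = Tn
--     return ds, cs
--
-- def MASH_1_1_1(data_in):
--     "This outputs an 8-level (-3 to +4 inclusive) 1-1-1 MASH modulated data set from an input data set of floating point samples"
--     m = [x & (_M - 1) for x in data_in]
--     d0, c0 = _stage(1, m)
--     d1, c1 = _stage(0, d0)
--     _, c2 = _stage(0, d1)
--     out = []
--     c1p = 0
--     c2p = 0
--     c2pp = 0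
--     for a, b, c in zip(c0, c1, c2):
--         out.append(a + b - c1p + c - 2 * c2p + c2pp)
--         c2pp = c2p
--         c2p = c
--         c1p = b
--     return out
-- ===== Notes on version B (the rewrite author's own statement) =====
-- stated objective: alternative
-- what changed: Replaces the single-pass flip-flop (latch/carry register) simulation by three seeded cumulative-sum passes per accumulator stage (the carry is the step increment of the running total shifted right by 20) plus one combining pass over the zipped carry streams.
import Mathlib
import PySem

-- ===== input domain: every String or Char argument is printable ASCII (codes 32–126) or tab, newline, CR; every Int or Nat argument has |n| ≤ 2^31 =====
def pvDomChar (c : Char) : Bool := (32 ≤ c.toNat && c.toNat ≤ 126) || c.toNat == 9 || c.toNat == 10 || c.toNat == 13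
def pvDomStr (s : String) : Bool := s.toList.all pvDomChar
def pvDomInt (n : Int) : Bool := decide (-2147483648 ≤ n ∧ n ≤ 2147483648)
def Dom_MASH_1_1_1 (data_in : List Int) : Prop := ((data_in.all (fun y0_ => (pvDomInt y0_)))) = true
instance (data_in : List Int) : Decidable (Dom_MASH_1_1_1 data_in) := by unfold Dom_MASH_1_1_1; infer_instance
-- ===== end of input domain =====

-- B replaces A's single-pass flip-flop simulation by three seeded cumulative-sum passes
-- (carry = step increment of T >> 20) plus one combining pass; alternative decomposition, same cost.

-- ===== PORT A =====
-- Python '&' is PySem.Int.band, '<<'/'>>' are Lean's <<< / >>> (Python-exact per PYSEM.md).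
def accum_carry (a b : Int) (m : Nat) : Int × Int :=
  let mask : Int := ((1 : Int) <<< m) - 1
  let a := PySem.Int.band a mask
  let b := PySem.Int.band b mask
  let sum := a + b
  let carry := (PySem.Int.band sum ((1 : Int) <<< m)) >>> m
  let sum := PySem.Int.band sum mask
  (sum, carry)

def MashAStep (st : List Int × Int × Int × Int × Int × Int × Int) (x : Int) :
    List Int × Int × Int × Int × Int × Int × Int :=
  match st with
  | (out, q0, q1, q2, c1_d, c2_d, c2_d_d) =>
    let dc0 := accum_carry q0 x 20
    let d0 := dc0.1
    let c0 := dc0.2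
    let dc1 := accum_carry q1 d0 20
    let d1 := dc1.1
    let c1 := dc1.2
    let dc2 := accum_carry q2 d1 20
    let d2 := dc2.1
    let c2 := dc2.2
    let first := c0
    let second := first + (c1 - c1_d)
    let third := second + c2 - (c2_d <<< (1 : Nat)) + c2_d_d
    (out ++ [third], d0, d1, d2, c1, c2, c2_d)

def MASH_1_1_1 (data_in : List Int) : List Int :=
  (data_in.foldl MashAStep ([], 1, 0, 0, 0, 0, 0)).1

-- ===== PORT B =====
def MashStageStep (st : Int × List Int × List Int) (x : Int) : Int × List Int × List Int :=
  match st with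
  | (T, ds, cs) =>
    let Tn := T + x
    (Tn, ds ++ [PySem.Int.band Tn (((1 : Int) <<< 20) - 1)], cs ++ [(Tn >>> (20 : Nat)) - (T >>> (20 : Nat))])

def MashStage (seed : Int) (xs : List Int) : List Int × List Int :=
  let st := xs.foldl MashStageStep (seed, [], [])
  (st.2.1, st.2.2)

def MashCombineStep (st : List Int × Int × Int × Int) (abc : Int × Int × Int) :
    List Int × Int × Int × Int :=
  match st, abc with
  | (out, c1p, c2p, c2pp), (a, b, c) =>
    (out ++ [a + b - c1p + c - 2 * c2p + c2pp], b, c, c2p)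

def MASH_1_1_1_alt (data_in : List Int) : List Int :=
  let m := data_in.map (fun x => PySem.Int.band x (((1 : Int) <<< 20) - 1))
  let s0 := MashStage 1 m
  let s1 := MashStage 0 s0.1
  let s2 := MashStage 0 s1.1
  ((s0.2.zip (s1.2.zip s2.2)).foldl MashCombineStep ([], 0, 0, 0)).1

-- ===== PRECONDITION & SPEC =====
def Spec_MASH_1_1_1 (data_in : List Int) (out : List Int) : Prop := out = MASH_1_1_1_alt data_in
instance (data_in : List Int) (out : List Int) : Decidable (Spec_MASH_1_1_1 data_in out) := by unfold Spec_MASH_1_1_1; infer_instance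

-- ===== CLAIM (what is proved, stated in full; the proofs are below) =====
def Claim_equal_MASH_1_1_1 : Prop := ∀ (data_in : List Int), Dom_MASH_1_1_1 data_in → Spec_MASH_1_1_1 data_in (MASH_1_1_1 data_in)

-- ===== LEMMAS AND PROOFS =====

-- Common reference recursion both ports are reduced to ("fused" one-pass form).
def MashFused (r0 r1 r2 c1p c2p c2pp : Int) : List Int → List Int
  | [] => []
  | x :: xs =>
    let m := x % 1048576
    let s0 := r0 + m
    let d0 := s0 % 1048576
    let c0 := s0 / 1048576
    let s1 := r1 + d0
    let d1 := s1 % 1048576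
    let c1 := s1 / 1048576
    let s2 := r2 + d1
    let d2 := s2 % 1048576
    let c2 := s2 / 1048576
    (c0 + c1 - c1p + c2 - 2 * c2p + c2pp) :: MashFused d0 d1 d2 c1 c2 c2p xs

lemma nat_and_mask (n : Nat) : n &&& 1048575 = n % 1048576 := by
  have := Nat.and_two_pow_sub_one_eq_mod n 20
  norm_num at this; omega

-- Python '& (2^20-1)' is 'mod 2^20' on every int.
lemma band_mask (a : Int) : PySem.Int.band a (((1 : Int) <<< 20) - 1) = a % 1048576 := by
  have hm : ((1 : Int) <<< 20) - 1 = 1048575 := by decide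
  rw [hm, PySem.Int.band]
  have ht : (1048575 : Int).toNat = 1048575 := rfl
  by_cases ha : 0 ≤ a
  · simp only [if_pos ha, if_pos (by norm_num : (0:Int) ≤ 1048575)]
    rw [ht, nat_and_mask]
    omega
  · simp only [if_neg ha, if_pos (by norm_num : (0:Int) ≤ 1048575)]
    rw [ht, Nat.and_comm, nat_and_mask]
    omega

lemma nat_and_pow (n : Nat) : n &&& 1048576 = 1048576 * (n / 1048576 % 2) := by
  have h := Nat.and_two_pow n 20
  rw [Nat.toNat_testBit] at h
  norm_num at h
  rw [h]; ring

lemma band_mask' (a : Int) : PySem.Int.band a (((1 : Int) <<< (20 : Nat)) - 1) = a % 1048576 := by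
  have hm : ((1 : Int) <<< (20 : Nat)) - 1 = 1048575 := by decide
  rw [hm, PySem.Int.band]
  have ht : (1048575 : Int).toNat = 1048575 := rfl
  by_cases ha : 0 ≤ a
  · simp only [if_pos ha, if_pos (by norm_num : (0:Int) ≤ 1048575)]
    rw [ht, nat_and_mask]
    omega
  · simp only [if_neg ha, if_pos (by norm_num : (0:Int) ≤ 1048575)]
    rw [ht, Nat.and_comm, nat_and_mask]
    omega

lemma carry_eq (s : Int) (hs : 0 ≤ s) (hs2 : s < 2097152) :
    (PySem.Int.band s ((1 : Int) <<< (20 : Nat))) >>> (20 : Nat) = s / 1048576 := by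
  have hp : ((1 : Int) <<< (20 : Nat)) = 1048576 := by decide
  rw [hp, PySem.Int.band_of_nonneg hs (by norm_num)]
  have ht : (1048576 : Int).toNat = 1048576 := rfl
  rw [ht, nat_and_pow]
  have h2 : s.toNat / 1048576 % 2 = s.toNat / 1048576 := by omega
  rw [h2]
  rcases (by omega : s.toNat / 1048576 = 0 ∨ s.toNat / 1048576 = 1) with h | h <;> rw [h]
  · rw [show ((1048576 * 0 : Nat) : Int) >>> (20 : Nat) = 0 from by decide]
    omega
  · rw [show ((1048576 * 1 : Nat) : Int) >>> (20 : Nat) = 1 from by decide]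
    omega

lemma accum_carry_eq (a b : Int) (ha : 0 ≤ a) (ha2 : a < 1048576) :
    accum_carry a b 20 =
      ((a + b % 1048576) % 1048576, (a + b % 1048576) / 1048576) := by
  simp only [accum_carry, band_mask']
  have hae : a % 1048576 = a := by omega
  rw [hae, carry_eq (a + b % 1048576) (by omega) (by omega)]

-- A's loop equals the fused recursion.
lemma a_loop_eq (xs : List Int) (acc : List Int) (q0 q1 q2 c1p c2p c2pp : Int)
    (h0 : 0 ≤ q0 ∧ q0 < 1048576) (h1 : 0 ≤ q1 ∧ q1 < 1048576) (h2 : 0 ≤ q2 ∧ q2 < 1048576) :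
    (xs.foldl MashAStep (acc, q0, q1, q2, c1p, c2p, c2pp)).1
      = acc ++ MashFused q0 q1 q2 c1p c2p c2pp xs := by
  induction xs generalizing acc q0 q1 q2 c1p c2p c2pp with
  | nil => simp [MashFused]
  | cons x xs ih =>
    simp only [List.foldl_cons, MashAStep]
    rw [accum_carry_eq q0 x h0.1 h0.2]
    rw [accum_carry_eq q1 _ h1.1 h1.2]
    rw [accum_carry_eq q2 _ h2.1 h2.2]
    have hmm : ∀ z : Int, z % 1048576 % 1048576 = z % 1048576 := fun z => by omega
    simp only [hmm]
    rw [ih _ _ _ _ _ _ _ ⟨by omega, by omega⟩ ⟨by omega, by omega⟩ ⟨by omega, by omega⟩]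
    simp only [MashFused, List.append_assoc, List.singleton_append]
    refine congrArg (acc ++ ·) ?_
    rw [List.cons.injEq]
    refine ⟨?_, rfl⟩
    have hsh : ∀ z : Int, z <<< (1 : Nat) = 2 * z := fun z => by rw [Int.shiftLeft_eq]; ring
    rw [hsh]; ring

-- Proof-side recursive characterisations of B's stage fold.
def MashDs (T : Int) : List Int → List Int
  | [] => []
  | x :: xs => (T + x) % 1048576 :: MashDs (T + x) xs

def MashCs (T : Int) : List Int → List Int
  | [] => []
  | x :: xs => ((T + x) / 1048576 - T / 1048576) :: MashCs (T + x) xs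

lemma stage_fold_eq (xs : List Int) (T : Int) (ds cs : List Int) :
    xs.foldl MashStageStep (T, ds, cs) = (T + xs.sum, ds ++ MashDs T xs, cs ++ MashCs T xs) := by
  induction xs generalizing T ds cs with
  | nil => simp [MashDs, MashCs]
  | cons x xs ih =>
    simp only [List.foldl_cons, MashStageStep]
    rw [ih]
    simp only [MashDs, MashCs, List.sum_cons, band_mask, Int.shiftRight_eq_div_pow,
      List.append_assoc, List.singleton_append]
    norm_num
    ring_nf

lemma stage_eq (seed : Int) (xs : List Int) : MashStage seed xs = (MashDs seed xs, MashCs seed xs) := by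
  rw [MashStage, stage_fold_eq]
  simp

def MashComb (c1p c2p c2pp : Int) : List Int → List Int → List Int → List Int
  | a :: as_, b :: bs, c :: cs => (a + b - c1p + c - 2 * c2p + c2pp) :: MashComb b c c2p as_ bs cs
  | _, _, _ => []

lemma combine_fold_eq (c0 c1 c2 : List Int) (out : List Int) (c1p c2p c2pp : Int) :
    ((c0.zip (c1.zip c2)).foldl MashCombineStep (out, c1p, c2p, c2pp)).1
      = out ++ MashComb c1p c2p c2pp c0 c1 c2 := by
  induction c0 generalizing c1 c2 out c1p c2p c2pp with
  | nil => simp [MashComb]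
  | cons a as ih =>
    cases c1 with
    | nil => simp [MashComb]
    | cons b bs =>
      cases c2 with
      | nil => simp [MashComb]
      | cons c cs =>
        simp only [List.zip_cons_cons, List.foldl_cons, MashCombineStep]
        rw [ih]
        simp [MashComb]

lemma fused_congr (a a' b b' c c' d d' e e' f : Int) (xs : List Int)
    (ha : a = a') (hb : b = b') (hc : c = c') (hd : d = d') (he : e = e') :
    MashFused a b c d e f xs = MashFused a' b' c' d' e' f xs := by
  subst ha hb hc hd he; rfl

lemma b_fused (xs : List Int) (T0 T1 T2 c1p c2p c2pp : Int) :
    MashComb c1p c2p c2pp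
        (MashCs T0 (xs.map (fun x => x % 1048576)))
        (MashCs T1 (MashDs T0 (xs.map (fun x => x % 1048576))))
        (MashCs T2 (MashDs T1 (MashDs T0 (xs.map (fun x => x % 1048576)))))
      = MashFused (T0 % 1048576) (T1 % 1048576) (T2 % 1048576) c1p c2p c2pp xs := by
  induction xs generalizing T0 T1 T2 c1p c2p c2pp with
  | nil => simp [MashDs, MashCs, MashComb, MashFused]
  | cons x xs ih =>
    simp only [List.map_cons, MashDs, MashCs, MashComb, MashFused]
    rw [List.cons.injEq]
    refine ⟨by omega, ?_⟩
    rw [ih]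
    exact fused_congr _ _ _ _ _ _ _ _ _ _ _ _ (by omega) (by omega) (by omega) (by omega) (by omega)

-- ===== VERDICT (by name: the statement is the Claim_ definition above) =====
theorem MASH_1_1_1_spec : Claim_equal_MASH_1_1_1 := by
  intro data_in _
  unfold Spec_MASH_1_1_1
  rw [MASH_1_1_1]
  rw [a_loop_eq data_in [] 1 0 0 0 0 0 (by omega) (by omega) (by omega)]
  rw [MASH_1_1_1_alt]
  simp only [band_mask, stage_eq, combine_fold_eq, List.nil_append]
  rw [b_fused]
  norm_num
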